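-- pv_equiv track=rewrite | github.com/cubeow/SquardleBot | squardleRecursion.py | checkAdjacentLetter
-- ===== SOURCE A (Python) =====
-- squardleBoard = [[['-'], ['A'], ['C'], ['K'], ['-']],
-- [['K'], ['J'], ['A'], ['L'], ['Y']],
-- [['N'], ['E'], ['R'], ['E'], ['C']],
-- [['B'], ['U'], ['L'], ['V'], ['D']],
-- [['-'], ['M'], ['Q'], ['S'], ['-']]]
--
-- def checkAdjacentLetter(pos, letter, pathTaken):
--     # loops through the whole thing to find the adjacent letters
--     allRoutes = []
--     for rowIndex, row in enumerate(squardleBoard):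
--         for columnIndex, cell in enumerate(row):
--             if abs(rowIndex-pos[0]) <= 1 and abs(columnIndex-pos[1]) <= 1 and [rowIndex, columnIndex] not in pathTaken:
--                 if cell[0] == letter.upper():
--                     allRoutes.append(pathTaken + [[rowIndex, columnIndex]])
--     return allRoutes
-- ===== SOURCE B (Python) =====
-- squardleBoard = [[['-'], ['A'], ['C'], ['K'], ['-']],
-- [['K'], ['J'], ['A'], ['L'], ['Y']],
-- [['N'], ['E'], ['R'], ['E'], ['C']],
-- [['B'], ['U'], ['L'], ['V'], ['D']],
-- [['-'], ['M'], ['Q'], ['S'], ['-']]]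
--
-- def checkAdjacentLetter(pos, letter, pathTaken):
--     # enumerate only the (at most 3x3) in-board neighborhood instead of scanning all 25 cells
--     target = letter.upper()
--     allRoutes = []
--     for r in range(max(pos[0] - 1, 0), min(pos[0] + 1, 4) + 1):
--         for c in range(max(pos[1] - 1, 0), min(pos[1] + 1, 4) + 1):
--             if [r, c] not in pathTaken and squardleBoard[r][c][0] == target:
--                 allRoutes.append(pathTaken + [[r, c]])
--     return allRoutes
-- ===== Notes on version B (the rewrite author's own statement) =====
-- stated objective: alternative
-- what changed: Instead of scanning all 25 board cells and filtering each by abs(row-pos[0])<=1 and abs(col-pos[1])<=1, B clamps the neighborhood to the board with max/min and iterates only over that at-most-3x3 range of rows and columns; the upper-cased letter is also computed once instead of per cell.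
import Mathlib
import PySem

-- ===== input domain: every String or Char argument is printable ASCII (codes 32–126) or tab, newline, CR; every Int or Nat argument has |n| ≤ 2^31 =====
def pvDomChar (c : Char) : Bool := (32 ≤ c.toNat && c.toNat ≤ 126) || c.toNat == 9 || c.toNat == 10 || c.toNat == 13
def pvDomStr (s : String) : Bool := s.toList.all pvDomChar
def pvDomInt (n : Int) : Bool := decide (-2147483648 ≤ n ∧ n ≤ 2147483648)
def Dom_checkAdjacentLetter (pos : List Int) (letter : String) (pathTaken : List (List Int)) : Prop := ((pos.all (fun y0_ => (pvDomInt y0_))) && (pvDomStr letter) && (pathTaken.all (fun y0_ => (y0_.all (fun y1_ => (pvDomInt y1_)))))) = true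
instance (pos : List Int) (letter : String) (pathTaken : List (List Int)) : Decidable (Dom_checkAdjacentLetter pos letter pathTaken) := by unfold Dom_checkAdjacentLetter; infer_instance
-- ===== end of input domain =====

-- B enumerates only the in-board 3x3 neighborhood of pos instead of scanning all 25 board cells (alternative traversal, same results in the same order).

-- the module-level squardleBoard constant (each cell is a one-element Python list)
def pvBoard : List (List (List String)) :=
  [[["-"], ["A"], ["C"], ["K"], ["-"]],
   [["K"], ["J"], ["A"], ["L"], ["Y"]],
   [["N"], ["E"], ["R"], ["E"], ["C"]],
   [["B"], ["U"], ["L"], ["V"], ["D"]],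
   [["-"], ["M"], ["Q"], ["S"], ["-"]]]

-- ===== PORT A =====
-- cell[0] is ported as pyGetD with default "" : every cell of the literal board is nonempty, so the default is never used
def checkAdjacentLetter (pos : List Int) (letter : String) (pathTaken : List (List Int)) : List (List (List Int)) :=
  (PySem.List.enumerate pvBoard 0).foldl (fun allRoutes rowE =>
    (PySem.List.enumerate rowE.2 0).foldl (fun acc cellE =>
      if (rowE.1 - PySem.List.pyGetD pos 0 0).natAbs ≤ 1 ∧ (cellE.1 - PySem.List.pyGetD pos 1 0).natAbs ≤ 1 ∧ [rowE.1, cellE.1] ∉ pathTaken then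
        if PySem.List.pyGetD cellE.2 0 "" = PySem.Str.upper letter then
          acc ++ [pathTaken ++ [[rowE.1, cellE.1]]]
        else acc
      else acc) allRoutes) []

-- ===== PORT B =====
-- squardleBoard[r][c][0] is ported as pyGetD with defaults: r and c are kept inside 0..4 by the range bounds, so defaults are never used
def checkAdjacentLetter_alt (pos : List Int) (letter : String) (pathTaken : List (List Int)) : List (List (List Int)) :=
  let target := PySem.Str.upper letter
  let p0 := PySem.List.pyGetD pos 0 0
  let p1 := PySem.List.pyGetD pos 1 0
  (PySem.List.pyRange (max (p0 - 1) 0) (min (p0 + 1) 4 + 1) 1).foldl (fun allRoutes r =>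
    (PySem.List.pyRange (max (p1 - 1) 0) (min (p1 + 1) 4 + 1) 1).foldl (fun acc c =>
      if [r, c] ∉ pathTaken ∧ PySem.List.pyGetD (PySem.List.pyGetD (PySem.List.pyGetD pvBoard r []) c []) 0 "" = target then
        acc ++ [pathTaken ++ [[r, c]]]
      else acc) allRoutes) []

-- ===== PRECONDITION & SPEC =====
-- Pre_ admits every input on which Python A returns: pos with at least two elements, and also pos of length one whose
-- single entry is far from every row index — there A's short-circuited 'and' never reads pos[1] and A returns [] (as
-- does B, whose outer range is empty). On the remaining short pos lists A raises IndexError reading pos[0] or pos[1].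
def Pre_checkAdjacentLetter (pos : List Int) (_letter : String) (_pathTaken : List (List Int)) : Prop :=
  2 ≤ pos.length ∨ (pos.length = 1 ∧ (PySem.List.pyGetD pos 0 0 < -1 ∨ 5 < PySem.List.pyGetD pos 0 0))
instance (pos : List Int) (letter : String) (pathTaken : List (List Int)) : Decidable (Pre_checkAdjacentLetter pos letter pathTaken) := by unfold Pre_checkAdjacentLetter; infer_instance
def pvWitness_checkAdjacentLetter : List Int × String × List (List Int) := ([2, 2], "e", [[2, 2]])
def Spec_checkAdjacentLetter (pos : List Int) (letter : String) (pathTaken : List (List Int)) (out : List (List (List Int))) : Prop := out = checkAdjacentLetter_alt pos letter pathTaken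
instance (pos : List Int) (letter : String) (pathTaken : List (List Int)) (out : List (List (List Int))) : Decidable (Spec_checkAdjacentLetter pos letter pathTaken out) := by unfold Spec_checkAdjacentLetter; infer_instance

-- ===== CLAIM (what is proved, stated in full; the proofs are below) =====
def Claim_equal_checkAdjacentLetter : Prop := ∀ (pos : List Int) (letter : String) (pathTaken : List (List Int)), Dom_checkAdjacentLetter pos letter pathTaken → Pre_checkAdjacentLetter pos letter pathTaken → Spec_checkAdjacentLetter pos letter pathTaken (checkAdjacentLetter pos letter pathTaken)

-- ===== LEMMAS AND PROOFS =====

-- two strictly increasing Int lists with the same members are equal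
lemma pvSortedExt (l1 l2 : List Int) (h1 : l1.Pairwise (· < ·)) (h2 : l2.Pairwise (· < ·))
    (h : ∀ x, x ∈ l1 ↔ x ∈ l2) : l1 = l2 :=
  ((List.perm_ext_iff_of_nodup (h1.imp ne_of_lt) (h2.imp ne_of_lt)).mpr h).eq_of_pairwise
    (fun _ _ _ _ hab hba => absurd hba (not_lt_of_gt hab)) h1 h2

-- B's clamped range is exactly the sorted adjacency filter of the 5 row (or column) indices
lemma pvRows_eq (g : Int) :
    PySem.List.pyRange (max (g - 1) 0) (min (g + 1) 4 + 1) 1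
      = ([0, 1, 2, 3, 4] : List Int).filter (fun r => decide ((r - g).natAbs ≤ 1)) := by
  apply pvSortedExt
  · exact PySem.List.pairwise_lt_pyRange_one _ _
  · exact (by decide : ([0,1,2,3,4] : List Int).Pairwise (· < ·)).filter _
  · intro x
    rw [PySem.List.mem_pyRange_one, List.mem_filter]
    simp only [List.mem_cons, List.not_mem_nil, or_false, decide_eq_true_eq]
    omega

-- a condition constant over a fold can be pushed inside
lemma pvFoldlIte {α β : Type} (P : Prop) [Decidable P] (l : List β)
    (f : α → β → α) (a : α) :
    (if P then l.foldl f a else a) = l.foldl (fun x c => if P then f x c else x) a := by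
  by_cases h : P
  · simp [h]
  · simp only [h, if_false]
    induction l generalizing a with
    | nil => rfl
    | cons x xs ih => simp only [List.foldl_cons]; exact ih a

-- A's one-cell test reshaped into B's nesting
lemma pvIteReorder {α : Type} (P Q S H : Prop) [Decidable P] [Decidable Q] [Decidable S] [Decidable H]
    (x a : α) :
    (if P ∧ Q ∧ S then (if H then x else a) else a)
      = (if P then if Q then if S ∧ H then x else a else a else a) := by
  by_cases hP : P <;> by_cases hQ : Q <;> by_cases hS : S <;> by_cases hH : H <;> simp [hP, hQ, hS, hH]

-- ===== VERDICT (by name: the statement is the Claim_ definition above) =====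
theorem checkAdjacentLetter_spec : Claim_equal_checkAdjacentLetter := by
  intro pos letter pathTaken _ _
  unfold Spec_checkAdjacentLetter checkAdjacentLetter checkAdjacentLetter_alt
  dsimp only []
  rw [PySem.List.enumerate_eq_map_pyRange pvBoard []]
  generalize PySem.List.pyGetD pos 0 0 = g0
  generalize PySem.List.pyGetD pos 1 0 = g1
  rw [List.foldl_map,
    show PySem.List.pyRange 0 (PySem.List.len pvBoard) = [0, 1, 2, 3, 4] from by decide]
  simp only [pvRows_eq, List.foldl_filter, pvFoldlIte, decide_eq_true_eq]
  have hlen : ∀ r ∈ ([0, 1, 2, 3, 4] : List Int),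
      PySem.List.pyRange 0 (PySem.List.len (PySem.List.pyGetD pvBoard r [])) = [0, 1, 2, 3, 4] := by
    decide
  apply PySem.List.foldl_congr_mem
  intro acc r hr
  rw [PySem.List.enumerate_eq_map_pyRange (PySem.List.pyGetD pvBoard r []) [], List.foldl_map,
    hlen r hr]
  apply PySem.List.foldl_congr_mem
  intro a c _
  exact pvIteReorder _ _ _ _ _ _
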